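-- pv_equiv track=rewrite | github.com/laclustr/CSP | Problem Sets/CSP-Pset1/grant_vance_pset1.py | make_hollow_diamond
-- ===== SOURCE A (Python) =====
-- def make_hollow_diamond(n):
-- 	result = ""
-- 	iterations = n
--
-- 	for i in range(iterations):
-- 		row = " " * (iterations - i - 1)
--
-- 		if i == 0:
-- 			row += "*"
-- 		else:
-- 			row += "*" + " " * (2 * i - 1) + "*"
--
-- 		result += row + "\n"
--
-- 	for i in range(iterations - 2, -1, -1):
-- 		row = " " * (iterations - i - 1)
--
-- 		if i == 0:
-- 			row += "*"
-- 		else: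
-- 			row += "*" + " " * (2 * i - 1) + "*"
--
-- 		result += row + "\n"
--
-- 	return result
-- ===== SOURCE B (Python) =====
-- def make_hollow_diamond(n):
--     lines = []
--     for r in range(2 * n - 1):
--         i = n - 1 - abs(n - 1 - r)
--         row = [' '] * (n + i)
--         row[n - 1 - i] = '*'
--         row[n - 1 + i] = '*'
--         lines.append(''.join(row))
--     return '\n'.join(lines) + '\n' if lines else ''
-- ===== Notes on version B (the rewrite author's own statement) =====
-- stated objective: alternative
-- what changed: B makes one pass over all 2n-1 row indices, deriving each row's arm offset in closed form as i = n-1-|n-1-r| and building the row by assigning '*' into a space buffer at columns n-1-i and n-1+i, instead of A's two separate generating loops that assemble each row by string repetition and concatenation into a growing result string.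
import Mathlib
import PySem

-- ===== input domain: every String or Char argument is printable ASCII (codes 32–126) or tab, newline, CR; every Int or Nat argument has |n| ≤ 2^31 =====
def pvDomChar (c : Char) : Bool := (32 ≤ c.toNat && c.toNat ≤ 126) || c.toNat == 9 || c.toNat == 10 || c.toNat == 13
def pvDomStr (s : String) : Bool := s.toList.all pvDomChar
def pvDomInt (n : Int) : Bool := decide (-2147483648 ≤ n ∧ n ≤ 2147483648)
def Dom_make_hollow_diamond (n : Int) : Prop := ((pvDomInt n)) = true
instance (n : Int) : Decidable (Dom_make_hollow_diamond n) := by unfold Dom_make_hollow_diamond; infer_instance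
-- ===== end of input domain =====

-- B generates each of the 2n-1 rows directly from its row index r (i = n-1-|n-1-r|) with per-character
-- star placement into a space buffer, one single pass, instead of A's two generating loops with string repetition; objective: alternative.


-- ===== PORT A =====
-- the body of A's loop: ' ' * (iterations - i - 1) then '*' or '*' + spaces + '*'
def pvRowA (iterations i : Int) : List Char :=
  let row := PySem.List.pyRepeat [' '] (iterations - i - 1)
  if i = 0 then row ++ ['*']
  else row ++ (['*'] ++ PySem.List.pyRepeat [' '] (2 * i - 1) ++ ['*'])

def make_hollow_diamond (n : Int) : String :=
  let iterations := n
  let result : List Char := []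
  let result := (PySem.List.pyRange 0 iterations 1).foldl
    (fun acc i => acc ++ (pvRowA iterations i ++ ['\n'])) result
  let result := (PySem.List.pyRange (iterations - 2) (-1) (-1)).foldl
    (fun acc i => acc ++ (pvRowA iterations i ++ ['\n'])) result
  String.ofList result

-- ===== PORT B =====
-- B's loop body: a length-(n+i) space buffer with '*' assigned at columns n-1-i and n-1+i
-- (pySetD is exact here: both indices are nonnegative and in range whenever the loop body runs)
def pvRowB (n i : Int) : List Char :=
  let row := PySem.List.pyRepeat [' '] (n + i)
  let row := PySem.List.pySetD row (n - 1 - i) '*'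
  PySem.List.pySetD row (n - 1 + i) '*'

def make_hollow_diamond_alt (n : Int) : String :=
  let lines := (PySem.List.pyRange 0 (2 * n - 1) 1).map
    (fun r => pvRowB n (n - 1 - |n - 1 - r|))
  if lines = [] then ""
  else String.ofList (PySem.Chars.join ['\n'] lines ++ ['\n'])

-- ===== PRECONDITION & SPEC =====
def Spec_make_hollow_diamond (n : Int) (out : String) : Prop := out = make_hollow_diamond_alt n
instance (n : Int) (out : String) : Decidable (Spec_make_hollow_diamond n out) := by unfold Spec_make_hollow_diamond; infer_instance

-- ===== CLAIM (what is proved, stated in full; the proofs are below) =====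
def Claim_equal_make_hollow_diamond : Prop := ∀ (n : Int), Dom_make_hollow_diamond n → Spec_make_hollow_diamond n (make_hollow_diamond n)

-- ===== LEMMAS AND PROOFS =====

-- two '*' assignments into a space buffer, spelled out as appends (k1 < k2 < m)
theorem pvSet2_replicate (m k1 k2 : Nat) (h1 : k1 < k2) (h2 : k2 < m) :
    ((List.replicate m ' ').set k1 '*').set k2 '*' =
      List.replicate k1 ' ' ++ '*' :: (List.replicate (k2 - k1 - 1) ' ' ++ '*' :: List.replicate (m - k2 - 1) ' ') := by
  apply List.ext_getElem
  · simp; omega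
  · intro j hj1 hj2
    simp only [List.getElem_set, List.getElem_replicate, List.getElem_append,
      List.length_replicate, List.getElem_cons]
    split_ifs <;> first | rfl | omega

-- one '*' assignment at the last position of a space buffer
theorem pvSet1_replicate (m k : Nat) (h : k + 1 = m) :
    ((List.replicate m ' ').set k '*') = List.replicate k ' ' ++ ['*'] := by
  apply List.ext_getElem
  · simp; omega
  · intro j hj1 hj2
    simp only [List.getElem_set, List.getElem_replicate, List.getElem_append,
      List.length_replicate, List.getElem_cons]
    split_ifs <;> simp_all <;> omega

-- each row B builds equals the row A builds, for the indices A's loops actually use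
theorem pvRow_eq (n i : Int) (h0 : 0 ≤ i) (h1 : i < n) :
    pvRowB n i = pvRowA n i := by
  unfold pvRowB pvRowA
  dsimp only
  rw [PySem.List.pyRepeat_singleton, PySem.List.pyRepeat_singleton,
      PySem.List.pySetD_of_nonneg (i := n - 1 - i) _ _ (by omega),
      PySem.List.pySetD_of_nonneg (i := n - 1 + i) _ _ (by omega)]
  by_cases hi : i = 0
  · subst hi
    simp only [sub_zero, add_zero]
    rw [List.set_set, pvSet1_replicate _ _ (by omega)]
    have e : (n - 1).toNat = (n - 0 - 1).toNat := by omega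
    rw [e, if_pos trivial]
  · rw [if_neg hi,
       pvSet2_replicate (n + i).toNat (n - 1 - i).toNat (n - 1 + i).toNat (by omega) (by omega)]
    have e1 : (n - 1 - i).toNat = (n - i - 1).toNat := by omega
    have e2 : ((n - 1 + i).toNat - (n - i - 1).toNat - 1) = (2 * i - 1).toNat := by omega
    have e3 : ((n + i).toNat - (n - 1 + i).toNat - 1) = 0 := by omega
    rw [e1, e2, e3]
    simp

-- B's single index pass enumerates exactly A's two loop-index sequences
theorem pvIdx_eq (n : Int) (hn : 0 < n) :
    (PySem.List.pyRange 0 (2 * n - 1) 1).map (fun r => n - 1 - |n - 1 - r|) =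
      PySem.List.pyRange 0 n 1 ++ PySem.List.pyRange (n - 2) (-1) (-1) := by
  rw [PySem.List.pyRange_one_append 0 n (2 * n - 1) (by omega) (by omega), List.map_append]
  congr 1
  · rw [List.map_congr_left (g := id) (fun r hr => by
      rcases (PySem.List.mem_pyRange_one).1 hr with ⟨hr1, hr2⟩
      simp only [id]
      rw [abs_of_nonneg (by omega)]; omega)]
    exact List.map_id _
  · rw [PySem.List.pyRange_one (a := n) (b := 2 * n - 1),
        PySem.List.pyRange_neg_one (a := n - 2) (b := -1)]
    rw [List.map_map]
    have e : (2 * n - 1 - n).toNat = (n - 2 - -1).toNat := by omega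
    rw [e]
    apply List.map_congr_left
    intro k hk
    have hk' : (k : Int) ≤ n - 2 := by
      have := List.mem_range.1 hk
      omega
    simp only [Function.comp]
    rw [abs_of_nonpos (by omega)]
    omega

-- join with a newline followed by a trailing newline = concatenation of row+newline
theorem pvJoin_newline (L : List (List Char)) (h : L ≠ []) :
    PySem.Chars.join ['\n'] L ++ ['\n'] = L.flatMap (fun r => r ++ ['\n']) := by
  induction L with
  | nil => simp at h
  | cons a t ih =>
    cases t with
    | nil => simp [PySem.Chars.join_singleton]
    | cons b u =>
      rw [PySem.Chars.join_cons_cons]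
      have := ih (by simp)
      rw [List.append_assoc, this]
      simp

theorem make_hollow_diamond_eq (n : Int) :
    make_hollow_diamond n = make_hollow_diamond_alt n := by
  by_cases hn : n ≤ 0
  · have h1 : PySem.List.pyRange 0 n 1 = [] := PySem.List.pyRange_one_eq_nil hn
    have h2 : PySem.List.pyRange (n - 2) (-1) (-1) = [] := by
      rw [PySem.List.pyRange_neg_one_eq_reverse, PySem.List.pyRange_one_eq_nil (by omega)]
      simp
    have h3 : PySem.List.pyRange 0 (2 * n - 1) 1 = [] :=
      PySem.List.pyRange_one_eq_nil (by omega)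
    simp [make_hollow_diamond, make_hollow_diamond_alt, h1, h2, h3]
  · push Not at hn
    have hlines : (PySem.List.pyRange 0 (2 * n - 1) 1).map
        (fun r => pvRowB n (n - 1 - |n - 1 - r|)) ≠ [] := by
      rw [PySem.List.pyRange_one_cons (by omega)]; simp
    unfold make_hollow_diamond make_hollow_diamond_alt
    simp only [if_neg hlines]
    rw [PySem.List.foldl_append_eq_flatMap, PySem.List.foldl_append_eq_flatMap]
    have hmm : (PySem.List.pyRange 0 (2 * n - 1) 1).map
        (fun r => pvRowB n (n - 1 - |n - 1 - r|)) =
        ((PySem.List.pyRange 0 (2 * n - 1) 1).map (fun r => n - 1 - |n - 1 - r|)).map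
          (pvRowB n) := by rw [List.map_map]; rfl
    rw [hmm, pvIdx_eq n hn, List.map_append]
    rw [pvJoin_newline _ (by
      rw [PySem.List.pyRange_one_cons (a := 0) (by omega)]; simp)]
    rw [List.flatMap_append]
    simp only [List.flatMap_map, List.nil_append]
    congr 1
    congr 1
    · refine List.flatMap_congr ?_
      intro i hi
      rcases (PySem.List.mem_pyRange_one).1 hi with ⟨hi1, hi2⟩
      rw [pvRow_eq n i hi1 hi2]
    · refine List.flatMap_congr ?_
      intro i hi
      rcases (PySem.List.mem_pyRange_neg_one).1 hi with ⟨hi1, hi2⟩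
      rw [pvRow_eq n i (by omega) (by omega)]

-- ===== VERDICT (by name: the statement is the Claim_ definition above) =====
theorem make_hollow_diamond_spec : Claim_equal_make_hollow_diamond := by
  intro n _
  exact make_hollow_diamond_eq n
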